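-- pv_equiv track=rewrite | github.com/nickypro/machine-learning-many-spin-quantum-systems | NN.py | getSecondEdges
-- ===== SOURCE A (Python) =====
-- def getSecondEdges( edges ):
--     first_edges = {}
--     second_edges = set([])
--     for (i, j) in edges:
--         [ a, b ] = sorted([ i, j ])
--         if not first_edges.get( a ):
--             first_edges[ a ] = set([])
--         first_edges[ a ].add( b )
--
--     for key in first_edges:
--         for first_edge in first_edges[ key ]:
--             if not first_edges.get( first_edge ):
--                 continue
--             for second_edge in first_edges[ first_edge ]:
--                 second_edges.add( ( key, second_edge ) )
--
--     return second_edges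
-- ===== SOURCE B (Python) =====
-- def getSecondEdges(edges):
--     # Normalize each edge to (min, max) and keep first occurrences, in order.
--     directed = []
--     for (i, j) in edges:
--         p = (min(i, j), max(i, j))
--         if p not in directed:
--             directed.append(p)
--     # Distinct sources, in first-appearance order.
--     keys = []
--     for (a, b) in directed:
--         if a not in keys:
--             keys.append(a)
--     # Length-2 paths by repeated scans over the normalized edge list (no adjacency index).
--     second = []
--     for key in keys:
--         for (a, b) in directed:
--             if a == key:
--                 for (c, d) in directed:
--                     if c == b:
--                         if (key, d) not in second:
--                             second.append((key, d))
--     return set(second)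
-- ===== Notes on version B (the rewrite author's own statement) =====
-- stated objective: alternative
-- what changed: B drops A's source-indexed adjacency dictionary of sets and instead builds one deduplicated list of normalized edges, then finds length-2 paths by repeatedly scanning that list for continuations (match on the middle vertex), collecting results into a duplicate-free list.
import Mathlib
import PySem

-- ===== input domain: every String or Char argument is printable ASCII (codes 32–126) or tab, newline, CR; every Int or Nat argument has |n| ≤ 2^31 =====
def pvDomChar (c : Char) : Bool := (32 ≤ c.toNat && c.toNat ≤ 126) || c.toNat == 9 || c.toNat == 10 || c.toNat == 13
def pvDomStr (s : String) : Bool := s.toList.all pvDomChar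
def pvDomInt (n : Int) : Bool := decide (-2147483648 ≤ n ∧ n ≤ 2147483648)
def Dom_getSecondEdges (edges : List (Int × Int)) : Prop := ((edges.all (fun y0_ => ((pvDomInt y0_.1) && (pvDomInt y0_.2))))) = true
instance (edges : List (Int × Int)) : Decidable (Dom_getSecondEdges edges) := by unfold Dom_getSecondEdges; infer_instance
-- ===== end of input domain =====

-- B replaces A's source-indexed adjacency dictionary of sets with repeated scans over one
-- deduplicated normalized edge list (an alternative algorithm of similar size, not claimed faster).


-- ===== PORT A =====
-- sorted([i,j]) ported via PySem.List.sorted; reading the 2-element result with getD (always in range).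
-- first_edges[key] / first_edges[first_edge] direct indexing ported as getD (key always present when reached).
def pvStepA (fe : PySem.Dict Int (PySem.Set Int)) (ij : Int × Int) : PySem.Dict Int (PySem.Set Int) :=
  let l := PySem.List.sorted [ij.1, ij.2] (fun x => x) false
  let a := l.getD 0 0
  let b := l.getD 1 0
  let fe :=
    match fe.get? a with
    | none => fe.insert a PySem.Set.empty      -- first_edges.get(a) is None (falsy)
    | some s => if s = [] then fe.insert a PySem.Set.empty else fe   -- empty set is falsy too
  fe.modify a PySem.Set.empty (fun s => PySem.Set.add s b)   -- first_edges[a].add(b)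

def getSecondEdges (edges : List (Int × Int)) : List (Int × Int) :=
  let first_edges := edges.foldl pvStepA PySem.Dict.empty
  first_edges.keys.foldl (fun acc key =>
    (first_edges.getD key PySem.Set.empty).foldl (fun acc first_edge =>
      match first_edges.get? first_edge with
      | none => acc                                  -- 'if not first_edges.get(first_edge): continue'
      | some s => if s = [] then acc
        else s.foldl (fun acc second_edge => PySem.Set.add acc (key, second_edge)) acc) acc)
    PySem.Set.empty

-- ===== PORT B =====
def getSecondEdges_alt (edges : List (Int × Int)) : List (Int × Int) :=
  let directed := edges.foldl (fun ds ij =>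
    let p := (min ij.1 ij.2, max ij.1 ij.2)
    if p ∈ ds then ds else ds ++ [p]) []
  let keys := directed.foldl (fun ks ab => if ab.1 ∈ ks then ks else ks ++ [ab.1]) []
  let second := keys.foldl (fun acc key =>
    directed.foldl (fun acc ab =>
      if ab.1 = key then
        directed.foldl (fun acc cd =>
          if cd.1 = ab.2 then (if (key, cd.2) ∈ acc then acc else acc ++ [(key, cd.2)]) else acc) acc
      else acc) acc) []
  PySem.Set.ofList second

-- ===== PRECONDITION & SPEC =====
def Spec_getSecondEdges (edges : List (Int × Int)) (out : List (Int × Int)) : Prop := out = getSecondEdges_alt edges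
instance (edges : List (Int × Int)) (out : List (Int × Int)) : Decidable (Spec_getSecondEdges edges out) := by unfold Spec_getSecondEdges; infer_instance

-- ===== CLAIM (what is proved, stated in full; the proofs are below) =====
def Claim_equal_getSecondEdges : Prop := ∀ (edges : List (Int × Int)), Dom_getSecondEdges edges → Spec_getSecondEdges edges (getSecondEdges edges)

-- ===== LEMMAS AND PROOFS =====

-- The list of edges normalized to (min, max) pairs, in input order.
def pvNorm (edges : List (Int × Int)) : List (Int × Int) :=
  edges.map (fun ij => (min ij.1 ij.2, max ij.1 ij.2))

lemma pvSortedPair (i j : Int) :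
    PySem.List.sorted [i, j] (fun x => x) false = [min i j, max i j] := by
  apply PySem.List.sorted_id_eq_of_perm_of_pairwise
  · rcases le_total i j with h | h
    · simp [min_eq_left h, max_eq_right h]
    · rw [min_eq_right h, max_eq_left h]
      exact List.Perm.swap i j []
  · simp

-- Invariant of A's first loop, phrased against B's deduplicated normalized edge list:
-- the keys are the distinct first components, and the value at k lists the second
-- components of the normalized edges with first component k, in first-occurrence order.
lemma pvBuild_inv (edges : List (Int × Int)) :
    (edges.foldl pvStepA PySem.Dict.empty).keys
        = PySem.Set.ofList ((PySem.Set.ofList (pvNorm edges)).map Prod.fst)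
  ∧ ∀ k : Int, (edges.foldl pvStepA PySem.Dict.empty).getD k PySem.Set.empty
        = ((PySem.Set.ofList (pvNorm edges)).filter (fun p => decide (p.1 = k))).map Prod.snd := by
  induction edges using List.reverseRecOn with
  | nil =>
      constructor
      · simp [pvNorm, PySem.Set.ofList_nil, PySem.Dict.keys_empty]
      · intro k; simp [pvNorm, PySem.Set.ofList_nil, PySem.Dict.getD_empty, PySem.Set.empty]
  | append_singleton es e ih =>
      obtain ⟨ihk, ihv⟩ := ih
      set fe := es.foldl pvStepA PySem.Dict.empty with hfe
      set a := min e.1 e.2 with ha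
      set b := max e.1 e.2 with hb
      set D := PySem.Set.ofList (pvNorm es) with hD
      have hnorm : pvNorm (es ++ [e]) = pvNorm es ++ [(a, b)] := by
        simp only [pvNorm, List.map_append, List.map_singleton]
        rfl
      have hfold : (es ++ [e]).foldl pvStepA PySem.Dict.empty = pvStepA fe e := by
        rw [List.foldl_append]; rfl
      have hofl : PySem.Set.ofList (pvNorm (es ++ [e])) = D.add (a, b) := by
        rw [hnorm, PySem.Set.ofList_append_singleton]
      have hstep : pvStepA fe e =
          (match fe.get? a with
           | none => fe.insert a PySem.Set.empty
           | some s => if s = [] then fe.insert a PySem.Set.empty else fe).modify a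
            PySem.Set.empty (fun s => PySem.Set.add s b) := by
        unfold pvStepA
        rw [pvSortedPair]
        rfl
      have hmem_snd : ∀ k x : Int,
          x ∈ (D.filter (fun p => decide (p.1 = k))).map Prod.snd ↔ (k, x) ∈ D := by
        intro k x
        simp only [List.mem_map, List.mem_filter, decide_eq_true_eq]
        constructor
        · rintro ⟨⟨p1, p2⟩, ⟨hp, h1⟩, h2⟩
          simp at h1 h2; subst h1; subst h2; exact hp
        · intro h; exact ⟨(k, x), ⟨h, by simp⟩, rfl⟩
      have hfsing : ∀ k : Int, ¬ k = a →
          List.filter (fun p => decide (p.1 = k)) [((a : Int), (b : Int))] = [] := by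
        intro k hk
        simp [(Ne.symm hk : a ≠ k)]
      have hfsing_self :
          (List.filter (fun p => decide (p.1 = a)) [((a : Int), (b : Int))]).map Prod.snd
            = [b] := by simp
      rw [hfold, hstep, hofl]
      rcases hga : fe.get? a with _ | s
      · -- 'first_edges.get(a)' is None: a is a fresh key
        have hka : a ∉ fe.keys := (PySem.Dict.get?_eq_none_iff_not_mem_keys fe a).mp hga
        have hcf : fe.contains a = false := by
          rw [PySem.Dict.contains_eq_isSome_get?, hga]; rfl
        have hab : (a, b) ∉ D := fun h => hka (by
          rw [ihk, PySem.Set.mem_ofList]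
          exact List.mem_map_of_mem h)
        have hDadd : D.add (a, b) = D ++ [(a, b)] := PySem.Set.add_of_not_mem hab
        have hgda : fe.getD a PySem.Set.empty = PySem.Set.empty :=
          PySem.Dict.getD_of_get?_eq_none _ _ hga
        have hva : (D.filter (fun p => decide (p.1 = a))).map Prod.snd = [] := by
          have h := (ihv a).symm
          rw [hgda] at h
          exact h
        constructor
        · rw [PySem.Dict.keys_modify, PySem.Dict.keys_insert_of_contains _ _
            (PySem.Dict.contains_insert_self fe a PySem.Set.empty),
            PySem.Dict.keys_insert_of_not_contains _ _ hcf, hDadd]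
          have hnm : a ∉ PySem.Set.ofList (D.map Prod.fst) := by rwa [← ihk]
          rw [List.map_append, List.map_singleton, PySem.Set.ofList_append_singleton,
            PySem.Set.add_of_not_mem hnm, ihk]
        · intro k
          simp only [PySem.Dict.getD_modify, PySem.Dict.getD_insert, hDadd]
          by_cases hk : k = a
          · subst hk
            rw [if_pos rfl]
            rw [List.filter_append, List.map_append, hva, hfsing_self]
            rfl
          · simp only [if_neg hk]
            rw [ihv k, List.filter_append, hfsing k hk, List.append_nil]
      · -- 'first_edges.get(a)' is the set s (possibly empty, then treated as falsy)
        have hka : a ∈ fe.keys := by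
          by_contra h
          rw [← PySem.Dict.get?_eq_none_iff_not_mem_keys] at h
          rw [hga] at h; cases h
        have hgda : fe.getD a PySem.Set.empty = s :=
          PySem.Dict.getD_of_get?_eq_some _ _ hga
        have hs : s = (D.filter (fun p => decide (p.1 = a))).map Prod.snd := by
          rw [← hgda]; exact ihv a
        have hca : fe.contains a = true := by
          rw [PySem.Dict.contains_eq_isSome_get?, hga]; rfl
        have hkeys1 : ∀ k, ((if s = [] then fe.insert a PySem.Set.empty else fe).modify a
            PySem.Set.empty (fun t => PySem.Set.add t b)).getD k PySem.Set.empty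
            = if k = a then PySem.Set.add s b else fe.getD k PySem.Set.empty := by
          intro k
          by_cases hnil : s = []
          · rw [if_pos hnil]
            simp only [PySem.Dict.getD_modify, PySem.Dict.getD_insert]
            by_cases hk : k = a
            · simp [hk, hnil, PySem.Set.empty]
            · simp [hk]
          · rw [if_neg hnil, PySem.Dict.getD_modify]
            by_cases hk : k = a
            · simp [hk, show fe.getD a [] = s from hgda]
            · simp [hk]
        have hkeyseq : ((if s = [] then fe.insert a PySem.Set.empty else fe).modify a
            PySem.Set.empty (fun t => PySem.Set.add t b)).keys = fe.keys := by
          by_cases hnil : s = []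
          · rw [if_pos hnil, PySem.Dict.keys_modify,
              PySem.Dict.keys_insert_of_contains _ _
                (PySem.Dict.contains_insert_self fe a PySem.Set.empty),
              PySem.Dict.keys_insert_of_contains _ _ hca]
          · rw [if_neg hnil, PySem.Dict.keys_modify,
              PySem.Dict.keys_insert_of_contains _ _ hca]
        constructor
        · rw [hkeyseq, ihk, PySem.Set.add_eq_ite]
          by_cases hm : (a, b) ∈ D
          · rw [if_pos hm]
          · have haD : a ∈ PySem.Set.ofList (List.map Prod.fst D) := by
              rw [← ihk]; exact hka
            rw [if_neg hm, List.map_append, List.map_singleton,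
              PySem.Set.ofList_append_singleton, PySem.Set.add_of_mem haD]
        · intro k
          rw [hkeys1 k]
          by_cases hk : k = a
          · subst hk
            rw [if_pos rfl]
            rw [PySem.Set.add_eq_ite D (a, b)]
            by_cases hm : (a, b) ∈ D
            · have hbs : b ∈ s := by rw [hs]; exact (hmem_snd a b).mpr hm
              rw [if_pos hm, PySem.Set.add_of_mem hbs, hs]
            · have hbs : b ∉ s := fun hbs => hm ((hmem_snd a b).mp (hs ▸ hbs))
              rw [if_neg hm, PySem.Set.add_of_not_mem hbs, List.filter_append,
                List.map_append, hfsing_self, hs]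
          · simp only [if_neg hk]
            rw [ihv k, PySem.Set.add_eq_ite]
            by_cases hm : (a, b) ∈ D
            · rw [if_pos hm]
            · rw [if_neg hm, List.filter_append, hfsing k hk, List.append_nil]

lemma pvFoldlIteFilterMap {A B C : Type} (p : A → Prop) [DecidablePred p]
    (f : A → B) (g : C → B → C) :
    ∀ (l : List A) (init : C),
      l.foldl (fun acc x => if p x then g acc (f x) else acc) init
        = ((l.filter (fun x => decide (p x))).map f).foldl g init := by
  intro l
  induction l with
  | nil => intro init; rfl
  | cons x xs ih => intro init; by_cases h : p x <;> simp [h, ih]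


lemma pvFoldNodup {A B : Type} (g : List A → B → List A)
    (hg : ∀ (acc : List A) (x : B), acc.Nodup → (g acc x).Nodup) :
    ∀ (l : List B) (init : List A), init.Nodup → (l.foldl g init).Nodup := by
  intro l
  induction l with
  | nil => intro init h; exact h
  | cons x xs ih => intro init h; exact ih _ (hg init x h)

lemma pvDirEq (edges : List (Int × Int)) :
    edges.foldl (fun ds ij => if ((min ij.1 ij.2, max ij.1 ij.2) : Int × Int) ∈ ds then ds
      else ds ++ [(min ij.1 ij.2, max ij.1 ij.2)]) []
    = PySem.Set.ofList (pvNorm edges) := by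
  rw [PySem.Set.ofList_eq_foldl, pvNorm, List.foldl_map]
  apply PySem.List.foldl_congr_mem
  intro acc x _
  rw [PySem.Set.add_eq_ite]

lemma pvKeysEq (D : List (Int × Int)) :
    D.foldl (fun ks ab => if ab.1 ∈ ks then ks else ks ++ [ab.1]) []
      = PySem.Set.ofList (D.map Prod.fst) := by
  rw [PySem.Set.ofList_eq_foldl, List.foldl_map]
  apply PySem.List.foldl_congr_mem
  intro acc x _
  rw [PySem.Set.add_eq_ite]

lemma pvInnerB (D : List (Int × Int)) (key b : Int) (acc : List (Int × Int)) :
    D.foldl (fun acc cd => if cd.1 = b then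
        (if (key, cd.2) ∈ acc then acc else acc ++ [(key, cd.2)]) else acc) acc
      = ((D.filter (fun p => decide (p.1 = b))).map Prod.snd).foldl
          (fun acc d => PySem.Set.add acc (key, d)) acc := by
  rw [← pvFoldlIteFilterMap (fun cd : Int × Int => cd.1 = b) Prod.snd
      (fun acc d => PySem.Set.add acc (key, d)) D acc]
  apply PySem.List.foldl_congr_mem
  intro acc cd _
  by_cases h : cd.1 = b
  · rw [if_pos h, if_pos h, PySem.Set.add_eq_ite]
  · rw [if_neg h, if_neg h]

lemma pvMidB (D : List (Int × Int)) (key : Int) (acc : List (Int × Int)) :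
    D.foldl (fun acc ab => if ab.1 = key then
        D.foldl (fun acc cd => if cd.1 = ab.2 then
          (if (key, cd.2) ∈ acc then acc else acc ++ [(key, cd.2)]) else acc) acc
      else acc) acc
      = ((D.filter (fun p => decide (p.1 = key))).map Prod.snd).foldl
          (fun acc b => ((D.filter (fun p => decide (p.1 = b))).map Prod.snd).foldl
            (fun acc d => PySem.Set.add acc (key, d)) acc) acc := by
  rw [← pvFoldlIteFilterMap (fun ab : Int × Int => ab.1 = key) Prod.snd
      (fun acc b => ((D.filter (fun p => decide (p.1 = b))).map Prod.snd).foldl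
        (fun acc d => PySem.Set.add acc (key, d)) acc) D acc]
  apply PySem.List.foldl_congr_mem
  intro acc ab _
  by_cases h : ab.1 = key
  · rw [if_pos h, if_pos h, pvInnerB]
  · rw [if_neg h, if_neg h]

-- ===== VERDICT (by name: the statement is the Claim_ definition above) =====
theorem getSecondEdges_spec : Claim_equal_getSecondEdges := by
  unfold Claim_equal_getSecondEdges
  intro edges _
  obtain ⟨hk, hv⟩ := pvBuild_inv edges
  unfold Spec_getSecondEdges getSecondEdges getSecondEdges_alt
  dsimp only
  rw [pvDirEq, pvKeysEq, hk]
  have hnodup : ((PySem.Set.ofList ((PySem.Set.ofList (pvNorm edges)).map Prod.fst)).foldl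
      (fun acc key => (PySem.Set.ofList (pvNorm edges)).foldl (fun acc ab =>
        if ab.1 = key then (PySem.Set.ofList (pvNorm edges)).foldl (fun acc cd =>
          if cd.1 = ab.2 then (if (key, cd.2) ∈ acc then acc else acc ++ [(key, cd.2)])
          else acc) acc else acc) acc) ([] : List (Int × Int))).Nodup := by
    apply pvFoldNodup _ ?_ _ _ List.nodup_nil
    intro acc key hacc
    apply pvFoldNodup _ ?_ _ _ hacc
    intro acc ab hacc2
    by_cases h : ab.1 = key
    · rw [if_pos h]
      apply pvFoldNodup _ ?_ _ _ hacc2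
      intro acc cd hacc3
      by_cases h2 : cd.1 = ab.2
      · rw [if_pos h2, ← PySem.Set.add_eq_ite]
        exact PySem.Set.nodup_add _ _ hacc3
      · rwa [if_neg h2]
    · rwa [if_neg h]
  refine Eq.trans ?_ (PySem.Set.ofList_eq_self_of_nodup _ hnodup).symm
  apply PySem.List.foldl_congr_mem
  intro acc key _
  rw [pvMidB, hv key]
  apply PySem.List.foldl_congr_mem
  intro acc2 b _
  rcases hgb : (edges.foldl pvStepA PySem.Dict.empty).get? b with _ | s
  · have h0 : (edges.foldl pvStepA PySem.Dict.empty).getD b PySem.Set.empty = [] :=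
      PySem.Dict.getD_of_get?_eq_none _ _ hgb
    have hflt : ((PySem.Set.ofList (pvNorm edges)).filter
        (fun p => decide (p.1 = b))).map Prod.snd = [] := by rw [← hv b, h0]
    rw [hflt]
    rfl
  · have h0 : (edges.foldl pvStepA PySem.Dict.empty).getD b PySem.Set.empty = s :=
      PySem.Dict.getD_of_get?_eq_some _ _ hgb
    have hflt : ((PySem.Set.ofList (pvNorm edges)).filter
        (fun p => decide (p.1 = b))).map Prod.snd = s := by rw [← hv b, h0]
    rw [hflt]
    show (if s = [] then acc2
      else List.foldl (fun acc second_edge => PySem.Set.add acc (key, second_edge)) acc2 s) = _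
    by_cases hnil : s = []
    · rw [if_pos hnil, hnil]
      rfl
    · rw [if_neg hnil]
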